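-- pv_equiv track=rewrite | github.com/MaxZdanoff/RubiksCubeSolver | Operations.py | rotate_moves
-- ===== SOURCE A (Python) =====
-- def rotate_moves(moves, side):
--     rotated_moves = []
--
--     if side == 'left':
--         rotate_left = {
--             'R': 'F', 'R2': 'F2', '-R': '-F', 'L': 'B', 'L2': 'B2', '-L': '-B',
--             'F': 'L', 'F2': 'L2', '-F': '-L', 'B': 'R', 'B2': 'R2', '-B': '-R'
--         }
--
--         for i in range(len(moves)):
--             if moves[i] in rotate_left.keys():
--                 rotated_moves.append(rotate_left[moves[i]])
--             else:
--                 rotated_moves.append(moves[i])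
--
--
--     if side == 'back':
--         rotate_back = {
--             'R': 'L', 'R2': 'L2', '-R': '-L', 'L': 'R', 'L2': 'R2', '-L': '-R',
--             'F': 'B', 'F2': 'B2', '-F': '-B', 'B': 'F', 'B2': 'F2', '-B': '-F'
--         }
--
--         for i in range(len(moves)):
--             if moves[i] in rotate_back.keys():
--                 rotated_moves.append(rotate_back[moves[i]])
--             else:
--                 rotated_moves.append(moves[i])
--
--
--     if side == 'right':
--         rotate_right = {
--             'R': 'B', 'R2': 'B2', '-R': '-B', 'L': 'F', 'L2': 'F2', '-L': '-F',
--             'F': 'R', 'F2': 'R2', '-F': '-R', 'B': 'L', 'B2': 'L2', '-B': '-L'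
--         }
--
--         for i in range(len(moves)):
--             if moves[i] in rotate_right.keys():
--                 rotated_moves.append(rotate_right[moves[i]])
--             else:
--                 rotated_moves.append(moves[i])
--
--
--     return rotated_moves
-- ===== SOURCE B (Python) =====
-- def rotate_moves(moves, side):
--     # One 4-entry face permutation per side instead of three 12-entry move dicts;
--     # a move is remapped only if it is exactly X, X2 or -X with X a permuted face.
--     if side == 'left':
--         perm = {'R': 'F', 'L': 'B', 'F': 'L', 'B': 'R'}
--     elif side == 'back':
--         perm = {'R': 'L', 'L': 'R', 'F': 'B', 'B': 'F'}
--     elif side == 'right':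
--         perm = {'R': 'B', 'L': 'F', 'F': 'R', 'B': 'L'}
--     else:
--         return []
--     out = []
--     for m in moves:
--         cs = list(m)
--         if len(cs) == 1 and cs[0] in perm:
--             out.append(perm[cs[0]])
--         elif len(cs) == 2 and cs[1] == '2' and cs[0] in perm:
--             out.append(perm[cs[0]] + '2')
--         elif len(cs) == 2 and cs[0] == '-' and cs[1] in perm:
--             out.append('-' + perm[cs[1]])
--         else:
--             out.append(m)
--     return out
-- ===== Notes on version B (the rewrite author's own statement) =====
-- stated objective: simpler
-- what changed: B replaces A's three hard-coded 12-entry move dictionaries (and three duplicated index loops) by one 4-entry face permutation per side plus a parse of each move into the shapes X, X2 or -X, rebuilding the remapped move from the permuted face.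
import Mathlib
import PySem

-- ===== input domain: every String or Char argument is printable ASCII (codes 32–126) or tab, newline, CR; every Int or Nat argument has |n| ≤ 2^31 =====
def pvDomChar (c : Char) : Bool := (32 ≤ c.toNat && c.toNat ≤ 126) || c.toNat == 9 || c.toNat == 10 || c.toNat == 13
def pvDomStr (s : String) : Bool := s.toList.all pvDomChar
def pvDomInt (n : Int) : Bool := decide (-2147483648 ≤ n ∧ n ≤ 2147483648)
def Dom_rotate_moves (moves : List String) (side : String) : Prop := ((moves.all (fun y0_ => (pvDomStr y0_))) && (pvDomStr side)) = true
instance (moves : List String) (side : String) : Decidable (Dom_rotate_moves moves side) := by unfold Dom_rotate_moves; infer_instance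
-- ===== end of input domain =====

-- B replaces the three 12-entry move dictionaries by one 4-entry face permutation per side
-- and a parse (X | X2 | -X) of each move; equivalence of return values is proved (objective: simpler).

-- ===== PORT A =====
def rotLeft : PySem.Dict String String := PySem.Dict.ofList
  [("R","F"),("R2","F2"),("-R","-F"),("L","B"),("L2","B2"),("-L","-B"),
   ("F","L"),("F2","L2"),("-F","-L"),("B","R"),("B2","R2"),("-B","-R")]

def rotBack : PySem.Dict String String := PySem.Dict.ofList
  [("R","L"),("R2","L2"),("-R","-L"),("L","R"),("L2","R2"),("-L","-R"),
   ("F","B"),("F2","B2"),("-F","-B"),("B","F"),("B2","F2"),("-B","-F")]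

def rotRight : PySem.Dict String String := PySem.Dict.ofList
  [("R","B"),("R2","B2"),("-R","-B"),("L","F"),("L2","F2"),("-L","-F"),
   ("F","R"),("F2","R2"),("-F","-R"),("B","L"),("B2","L2"),("-B","-L")]

def rotate_moves (moves : List String) (side : String) : List String :=
  let rotated_moves : List String := []
  let rotated_moves :=
    if side == "left" then
      (PySem.List.pyRange 0 (PySem.List.len moves) 1).foldl (fun acc i =>
        let m := PySem.List.pyGetD moves i ""
        if rotLeft.contains m then acc ++ [rotLeft.getD m m] else acc ++ [m]) rotated_moves
    else rotated_moves
  let rotated_moves :=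
    if side == "back" then
      (PySem.List.pyRange 0 (PySem.List.len moves) 1).foldl (fun acc i =>
        let m := PySem.List.pyGetD moves i ""
        if rotBack.contains m then acc ++ [rotBack.getD m m] else acc ++ [m]) rotated_moves
    else rotated_moves
  let rotated_moves :=
    if side == "right" then
      (PySem.List.pyRange 0 (PySem.List.len moves) 1).foldl (fun acc i =>
        let m := PySem.List.pyGetD moves i ""
        if rotRight.contains m then acc ++ [rotRight.getD m m] else acc ++ [m]) rotated_moves
    else rotated_moves
  rotated_moves

-- ===== PORT B =====
def permL : PySem.Dict Char Char := PySem.Dict.ofList [('R','F'),('L','B'),('F','L'),('B','R')]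
def permB : PySem.Dict Char Char := PySem.Dict.ofList [('R','L'),('L','R'),('F','B'),('B','F')]
def permR : PySem.Dict Char Char := PySem.Dict.ofList [('R','B'),('L','F'),('F','R'),('B','L')]

-- remap one move: the match on m.toList is Source B's `cs = list(m)` plus the two length tests
def altRemap (p : PySem.Dict Char Char) (m : String) : String :=
  match m.toList with
  | [c] => if p.contains c then String.ofList [p.getD c c] else m
  | [c1, c2] =>
      if c2 == '2' && p.contains c1 then String.ofList [p.getD c1 c1, '2']
      else if c1 == '-' && p.contains c2 then String.ofList ['-', p.getD c2 c2]
      else m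
  | _ => m

def rotate_moves_alt (moves : List String) (side : String) : List String :=
  if side == "left" then moves.foldl (fun out m => out ++ [altRemap permL m]) []
  else if side == "back" then moves.foldl (fun out m => out ++ [altRemap permB m]) []
  else if side == "right" then moves.foldl (fun out m => out ++ [altRemap permR m]) []
  else []

-- ===== PRECONDITION & SPEC =====
def Spec_rotate_moves (moves : List String) (side : String) (out : List String) : Prop := out = rotate_moves_alt moves side
instance (moves : List String) (side : String) (out : List String) : Decidable (Spec_rotate_moves moves side out) := by unfold Spec_rotate_moves; infer_instance

-- ===== CLAIM (what is proved, stated in full; the proofs are below) =====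
def Claim_equal_rotate_moves : Prop := ∀ (moves : List String) (side : String), Dom_rotate_moves moves side → Spec_rotate_moves moves side (rotate_moves moves side)

-- ===== LEMMAS AND PROOFS =====
theorem tl_R : "R".toList = ['R'] := by decide
theorem tl_R2 : "R2".toList = ['R', '2'] := by decide
theorem tl_nR : "-R".toList = ['-', 'R'] := by decide
theorem tl_L : "L".toList = ['L'] := by decide
theorem tl_L2 : "L2".toList = ['L', '2'] := by decide
theorem tl_nL : "-L".toList = ['-', 'L'] := by decide
theorem tl_F : "F".toList = ['F'] := by decide
theorem tl_F2 : "F2".toList = ['F', '2'] := by decide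
theorem tl_nF : "-F".toList = ['-', 'F'] := by decide
theorem tl_B : "B".toList = ['B'] := by decide
theorem tl_B2 : "B2".toList = ['B', '2'] := by decide
theorem tl_nB : "-B".toList = ['-', 'B'] := by decide

theorem beq_toList (s t : String) : (s == t) = (s.toList == t.toList) := by
  simp [String.ext_iff]

theorem rotLeft_eq : rotLeft = PySem.Dict.mk
  [("R","F"),("R2","F2"),("-R","-F"),("L","B"),("L2","B2"),("-L","-B"),
   ("F","L"),("F2","L2"),("-F","-L"),("B","R"),("B2","R2"),("-B","-R")] := by decide
theorem rotBack_eq : rotBack = PySem.Dict.mk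
  [("R","L"),("R2","L2"),("-R","-L"),("L","R"),("L2","R2"),("-L","-R"),
   ("F","B"),("F2","B2"),("-F","-B"),("B","F"),("B2","F2"),("-B","-F")] := by decide
theorem rotRight_eq : rotRight = PySem.Dict.mk
  [("R","B"),("R2","B2"),("-R","-B"),("L","F"),("L2","F2"),("-L","-F"),
   ("F","R"),("F2","R2"),("-F","-R"),("B","L"),("B2","L2"),("-B","-L")] := by decide
theorem permL_eq : permL = PySem.Dict.mk [('R','F'),('L','B'),('F','L'),('B','R')] := by decide
theorem permB_eq : permB = PySem.Dict.mk [('R','L'),('L','R'),('F','B'),('B','F')] := by decide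
theorem permR_eq : permR = PySem.Dict.mk [('R','B'),('L','F'),('F','R'),('B','L')] := by decide

-- A's per-move lookup (in one of the 12-key dicts) equals B's parse-and-permute, per side
set_option maxRecDepth 4096 in
theorem step_left (m : String) :
    (if rotLeft.contains m then rotLeft.getD m m else m) = altRemap permL m := by
  have hm : m = String.ofList m.toList := String.toList_inj.mp (by rw [String.toList_ofList])
  rcases hc : m.toList with _ | ⟨a, _ | ⟨b, _ | ⟨c, rest⟩⟩⟩ <;>
    rw [hm, hc] <;>
    simp [altRemap, rotLeft_eq, permL_eq, PySem.Dict.contains, PySem.Dict.get?,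
      PySem.Dict.getD, beq_toList, List.find?, String.toList_ofList,
      tl_R, tl_R2, tl_nR, tl_L, tl_L2, tl_nL, tl_F, tl_F2, tl_nF, tl_B, tl_B2, tl_nB] <;>
    (repeat' split) <;> simp_all [String.ext_iff] <;> aesop

set_option maxRecDepth 4096 in
theorem step_back (m : String) :
    (if rotBack.contains m then rotBack.getD m m else m) = altRemap permB m := by
  have hm : m = String.ofList m.toList := String.toList_inj.mp (by rw [String.toList_ofList])
  rcases hc : m.toList with _ | ⟨a, _ | ⟨b, _ | ⟨c, rest⟩⟩⟩ <;>
    rw [hm, hc] <;>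
    simp [altRemap, rotBack_eq, permB_eq, PySem.Dict.contains, PySem.Dict.get?,
      PySem.Dict.getD, beq_toList, List.find?, String.toList_ofList,
      tl_R, tl_R2, tl_nR, tl_L, tl_L2, tl_nL, tl_F, tl_F2, tl_nF, tl_B, tl_B2, tl_nB] <;>
    (repeat' split) <;> simp_all [String.ext_iff] <;> aesop

set_option maxRecDepth 4096 in
theorem step_right (m : String) :
    (if rotRight.contains m then rotRight.getD m m else m) = altRemap permR m := by
  have hm : m = String.ofList m.toList := String.toList_inj.mp (by rw [String.toList_ofList])
  rcases hc : m.toList with _ | ⟨a, _ | ⟨b, _ | ⟨c, rest⟩⟩⟩ <;>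
    rw [hm, hc] <;>
    simp [altRemap, rotRight_eq, permR_eq, PySem.Dict.contains, PySem.Dict.get?,
      PySem.Dict.getD, beq_toList, List.find?, String.toList_ofList,
      tl_R, tl_R2, tl_nR, tl_L, tl_L2, tl_nL, tl_F, tl_F2, tl_nF, tl_B, tl_B2, tl_nB] <;>
    (repeat' split) <;> simp_all [String.ext_iff] <;> aesop

-- A's index loop over one dict d equals map of the per-move lookup
theorem loopA_eq_map (moves : List String) (d : PySem.Dict String String) :
    (PySem.List.pyRange 0 (PySem.List.len moves) 1).foldl (fun acc i =>
        let m := PySem.List.pyGetD moves i ""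
        if d.contains m then acc ++ [d.getD m m] else acc ++ [m]) []
      = moves.map (fun m => if d.contains m then d.getD m m else m) := by
  rw [PySem.List.foldl_pyRange_zero_pyGetD moves "" (fun acc m =>
        if d.contains m then acc ++ [d.getD m m] else acc ++ [m]) []]
  have h : (fun (acc : List String) (m : String) =>
      if d.contains m then acc ++ [d.getD m m] else acc ++ [m])
      = fun acc m => acc ++ [if d.contains m then d.getD m m else m] := by
    funext acc m; split <;> rfl
  rw [h, PySem.List.foldl_append_singleton_eq_map]
  simp

-- one matched side: A's loop equals B's loop, given the per-move step lemma
theorem branchA (moves : List String) (d : PySem.Dict String String) (p : PySem.Dict Char Char)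
    (hstep : ∀ m, (if d.contains m then d.getD m m else m) = altRemap p m) :
    (PySem.List.pyRange 0 (PySem.List.len moves) 1).foldl (fun acc i =>
        let m := PySem.List.pyGetD moves i ""
        if d.contains m then acc ++ [d.getD m m] else acc ++ [m]) []
      = moves.foldl (fun out m => out ++ [altRemap p m]) [] := by
  rw [loopA_eq_map, PySem.List.foldl_append_singleton_eq_map]
  simp only [hstep, List.nil_append]

-- ===== VERDICT (by name: the statement is the Claim_ definition above) =====
theorem rotate_moves_spec : Claim_equal_rotate_moves := by
  intro moves side _
  unfold Spec_rotate_moves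
  by_cases hl : side = "left"
  · subst hl
    have hA : rotate_moves moves "left" = (PySem.List.pyRange 0 (PySem.List.len moves) 1).foldl
        (fun acc i =>
          let m := PySem.List.pyGetD moves i ""
          if rotLeft.contains m then acc ++ [rotLeft.getD m m] else acc ++ [m]) [] := rfl
    have hB : rotate_moves_alt moves "left"
        = moves.foldl (fun out m => out ++ [altRemap permL m]) [] := rfl
    rw [hA, hB, branchA moves rotLeft permL step_left]
  · by_cases hb : side = "back"
    · subst hb
      have hA : rotate_moves moves "back" = (PySem.List.pyRange 0 (PySem.List.len moves) 1).foldl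
          (fun acc i =>
            let m := PySem.List.pyGetD moves i ""
            if rotBack.contains m then acc ++ [rotBack.getD m m] else acc ++ [m]) [] := rfl
      have hB : rotate_moves_alt moves "back"
          = moves.foldl (fun out m => out ++ [altRemap permB m]) [] := rfl
      rw [hA, hB, branchA moves rotBack permB step_back]
    · by_cases hr : side = "right"
      · subst hr
        have hA : rotate_moves moves "right" = (PySem.List.pyRange 0 (PySem.List.len moves) 1).foldl
            (fun acc i =>
              let m := PySem.List.pyGetD moves i ""
              if rotRight.contains m then acc ++ [rotRight.getD m m] else acc ++ [m]) [] := rfl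
        have hB : rotate_moves_alt moves "right"
            = moves.foldl (fun out m => out ++ [altRemap permR m]) [] := rfl
        rw [hA, hB, branchA moves rotRight permR step_right]
      · simp [rotate_moves, rotate_moves_alt, hl, hb, hr]
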